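-- pv_equiv track=rewrite | github.com/allsv/gesture_intensity_presentation | analysis2.py | count_gestures
-- ===== SOURCE A (Python) =====
-- def count_gestures(lines, type):
--     lines_copy = []
--     encounter = '    <TIER LINGUISTIC_TYPE_REF="default-lt" TIER_ID="'\
--                 + type
--     for ln in lines:
--         lines_copy.append(ln)
--     for i in range(len(lines)):
--         if lines[i].startswith(encounter):
--             break
--         del lines_copy[0]
--     a_counter = 0
--     b_counter = 0
--     m_counter = 0
--     d_counter = 0
--     for ln in lines_copy:
--         if ln == "    </TIER>\n":
--             break
--         if ln.startswith("                <ANNOTATION_VALUE>beat"):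
--             a_counter += 1
--             b_counter += 1
--         if ln.startswith("                <ANNOTATION_VALUE>metaphoric"):
--             a_counter += 1
--             m_counter += 1
--         if ln.startswith("                <ANNOTATION_VALUE>deictic"):
--             a_counter += 1
--             d_counter += 1
--         else:
--             pass
--     return a_counter, b_counter, m_counter, d_counter
-- ===== SOURCE B (Python) =====
-- def count_gestures(lines, type):
--     encounter = '    <TIER LINGUISTIC_TYPE_REF="default-lt" TIER_ID="' + type
--     # find the start of the tier section (len(lines) if absent)
--     start = next((i for i, ln in enumerate(lines) if ln.startswith(encounter)), len(lines))
--     b = m = d = 0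
--     for ln in lines[start:]:
--         if ln == "    </TIER>\n":
--             break
--         if ln.startswith("                <ANNOTATION_VALUE>beat"):
--             b += 1
--         elif ln.startswith("                <ANNOTATION_VALUE>metaphoric"):
--             m += 1
--         elif ln.startswith("                <ANNOTATION_VALUE>deictic"):
--             d += 1
--     return b + m + d, b, m, d
-- ===== Notes on version B (the rewrite author's own statement) =====
-- stated objective: faster
-- what changed: Instead of copying the list and repeatedly deleting its head (O(n) per deletion) before counting with four independent ifs, B finds the start index in one scan, counts the three mutually exclusive annotation prefixes over the slice with an if/elif chain, and derives the total as their sum.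
import Mathlib
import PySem

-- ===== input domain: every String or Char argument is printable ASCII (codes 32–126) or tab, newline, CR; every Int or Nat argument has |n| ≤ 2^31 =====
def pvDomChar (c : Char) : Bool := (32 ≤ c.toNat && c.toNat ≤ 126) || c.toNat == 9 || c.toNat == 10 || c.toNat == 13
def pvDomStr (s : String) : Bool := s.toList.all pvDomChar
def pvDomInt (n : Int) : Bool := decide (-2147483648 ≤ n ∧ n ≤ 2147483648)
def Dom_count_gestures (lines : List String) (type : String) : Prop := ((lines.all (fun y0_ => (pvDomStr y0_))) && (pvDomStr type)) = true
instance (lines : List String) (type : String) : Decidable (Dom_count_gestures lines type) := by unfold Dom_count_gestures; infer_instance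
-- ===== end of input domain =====

-- B finds the tier start in one linear scan instead of A's repeated head-deletion on a copy (O(n^2)); return value only, A never mutates its arguments.
-- ===== PORT A =====
-- A: copy the list, delete the head once per loop step until the tier header, then count with four ifs.
def cgEnc (type : String) : String :=
  "    <TIER LINGUISTIC_TYPE_REF=\"default-lt\" TIER_ID=\"" ++ type

-- the second for-loop of A: for i in range(len(lines)): if lines[i].startswith(enc): break; del lines_copy[0]
def cgDelLoop (lines : List String) (enc : String) (copy : List String) (i : Nat) : List String :=
  if _h : i < lines.length then
    if PySem.Str.startswith lines[i] enc then copy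
    else cgDelLoop lines enc (copy.drop 1) (i + 1)
  else copy
termination_by lines.length - i

-- the counting for-loop of A, state (a_counter, b_counter, m_counter, d_counter)
def cgCountLoop : List String → Int → Int → Int → Int → Int × Int × Int × Int
  | [], a, b, m, d => (a, b, m, d)
  | ln :: rest, a, b, m, d =>
    if ln == "    </TIER>\n" then (a, b, m, d)
    else
      let (a, b) := if PySem.Str.startswith ln "                <ANNOTATION_VALUE>beat" then (a + 1, b + 1) else (a, b)
      let (a, m) := if PySem.Str.startswith ln "                <ANNOTATION_VALUE>metaphoric" then (a + 1, m + 1) else (a, m)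
      let (a, d) := if PySem.Str.startswith ln "                <ANNOTATION_VALUE>deictic" then (a + 1, d + 1) else (a, d)
      cgCountLoop rest a b m d

def count_gestures (lines : List String) (type : String) : Int × Int × Int × Int :=
  let lines_copy := lines.foldl (fun acc ln => acc ++ [ln]) []
  let lines_copy := cgDelLoop lines (cgEnc type) lines_copy 0
  cgCountLoop lines_copy 0 0 0 0

-- ===== PORT B =====
-- B: one scan to the first tier-header line, then count the three mutually exclusive prefixes
-- over that suffix with an if/elif chain; the total is their sum.
def cgAltSuffix (enc : String) : List String → List String
  | [] => []
  | ln :: rest => if PySem.Str.startswith ln enc then ln :: rest else cgAltSuffix enc rest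

def cgAltCount : List String → Int → Int → Int → Int × Int × Int
  | [], b, m, d => (b, m, d)
  | ln :: rest, b, m, d =>
    if ln == "    </TIER>\n" then (b, m, d)
    else if PySem.Str.startswith ln "                <ANNOTATION_VALUE>beat" then cgAltCount rest (b + 1) m d
    else if PySem.Str.startswith ln "                <ANNOTATION_VALUE>metaphoric" then cgAltCount rest b (m + 1) d
    else if PySem.Str.startswith ln "                <ANNOTATION_VALUE>deictic" then cgAltCount rest b m (d + 1)
    else cgAltCount rest b m d

def count_gestures_alt (lines : List String) (type : String) : Int × Int × Int × Int :=
  let enc := "    <TIER LINGUISTIC_TYPE_REF=\"default-lt\" TIER_ID=\"" ++ type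
  let (b, m, d) := cgAltCount (cgAltSuffix enc lines) 0 0 0
  (b + m + d, b, m, d)

-- ===== PRECONDITION & SPEC =====
def Spec_count_gestures (lines : List String) (type : String) (out : Int × Int × Int × Int) : Prop := out = count_gestures_alt lines type
instance (lines : List String) (type : String) (out : Int × Int × Int × Int) : Decidable (Spec_count_gestures lines type out) := by unfold Spec_count_gestures; infer_instance

-- ===== CLAIM (what is proved, stated in full; the proofs are below) =====
def Claim_equal_count_gestures : Prop := ∀ (lines : List String) (type : String), Dom_count_gestures lines type → Spec_count_gestures lines type (count_gestures lines type)

-- ===== LEMMAS AND PROOFS =====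



-- the three annotation prefixes are pairwise exclusive: a line starts with at most one of them
lemma cg_prefix_excl (ln p q : String)
    (hpq : ¬ (p.toList <+: q.toList) ∧ ¬ (q.toList <+: p.toList))
    (hp : PySem.Str.startswith ln p = true) : PySem.Str.startswith ln q = false := by
  rw [Bool.eq_false_iff]
  intro hq
  rw [PySem.Str.startswith_eq, PySem.Chars.startswith_iff] at hp hq
  rcases List.prefix_or_prefix_of_prefix hp hq with h | h
  · exact hpq.1 h
  · exact hpq.2 h

-- A's head-deletion loop yields the suffix of lines from the first header line
lemma cgDelLoop_eq_suffix (lines : List String) (enc : String) :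
    ∀ (suffix : List String) (i : Nat), lines.drop i = suffix →
      cgDelLoop lines enc suffix i = cgAltSuffix enc suffix := by
  intro suffix
  induction suffix with
  | nil =>
    intro i h
    have hlen : lines.length ≤ i := by
      by_contra hc
      have := List.drop_eq_nil_iff.mp h
      omega
    rw [cgDelLoop, cgAltSuffix]
    simp [Nat.not_lt.mpr hlen]
  | cons ln rest ih =>
    intro i h
    have hi : i < lines.length := by
      by_contra hc
      rw [List.drop_eq_nil_of_le (by omega)] at h
      simp at h
    have hget : lines[i] = ln := by
      have h0 : (lines.drop i)[0]? = some ln := by rw [h]; rfl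
      rw [List.getElem?_drop] at h0
      simp only [Nat.add_zero] at h0
      rw [List.getElem?_eq_getElem hi] at h0
      exact Option.some.inj h0
    have hdrop : lines.drop (i + 1) = rest := by
      rw [← List.drop_drop, h]
      rfl
    rw [cgDelLoop, cgAltSuffix]
    simp only [hi, dite_true, hget]
    by_cases hs : PySem.Str.startswith ln enc = true
    · rw [PySem.Str.startswith_eq] at hs
      simp [hs]
    · simp only [hs]
      exact ih (i + 1) hdrop

-- the two counting loops agree when A's total equals b + m + d
lemma cgCountLoop_eq_alt : ∀ (ls : List String) (b m d : Int),
    cgCountLoop ls (b + m + d) b m d =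
      ((cgAltCount ls b m d).1 + (cgAltCount ls b m d).2.1 + (cgAltCount ls b m d).2.2,
       (cgAltCount ls b m d).1, (cgAltCount ls b m d).2.1, (cgAltCount ls b m d).2.2) := by
  intro ls
  induction ls with
  | nil => intro b m d; rfl
  | cons ln rest ih =>
    intro b m d
    rw [cgCountLoop, cgAltCount]
    by_cases he : ln == "    </TIER>\n"
    · simp [he]
    · simp only [he, if_false, Bool.false_eq_true]
      by_cases hb : PySem.Str.startswith ln "                <ANNOTATION_VALUE>beat"
      · have hm := cg_prefix_excl ln _ "                <ANNOTATION_VALUE>metaphoric" (by decide) hb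
        have hd := cg_prefix_excl ln _ "                <ANNOTATION_VALUE>deictic" (by decide) hb
        simp only [hb, hm, hd, if_true, if_false, Bool.false_eq_true]
        have : b + m + d + 1 = (b + 1) + m + d := by ring
        rw [this]
        exact ih (b + 1) m d
      · simp only [hb, if_false, Bool.false_eq_true]
        by_cases hm : PySem.Str.startswith ln "                <ANNOTATION_VALUE>metaphoric"
        · have hd := cg_prefix_excl ln _ "                <ANNOTATION_VALUE>deictic" (by decide) hm
          simp only [hm, hd, if_true, if_false, Bool.false_eq_true]
          have : b + m + d + 1 = b + (m + 1) + d := by ring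
          rw [this]
          exact ih b (m + 1) d
        · simp only [hm, if_false, Bool.false_eq_true]
          by_cases hd : PySem.Str.startswith ln "                <ANNOTATION_VALUE>deictic"
          · simp only [hd, if_true]
            have : b + m + d + 1 = b + m + (d + 1) := by ring
            rw [this]
            exact ih b m (d + 1)
          · simp only [hd, if_false, Bool.false_eq_true]
            exact ih b m d

-- ===== VERDICT (by name: the statement is the Claim_ definition above) =====
theorem count_gestures_spec : Claim_equal_count_gestures := by
  intro lines type _
  unfold Spec_count_gestures
  have hcopy : lines.foldl (fun acc ln => acc ++ [ln]) [] = lines := by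
    rw [PySem.List.foldl_append_singleton]; exact List.nil_append lines
  rcases hA : cgAltCount (cgAltSuffix ("    <TIER LINGUISTIC_TYPE_REF=\"default-lt\" TIER_ID=\"" ++ type) lines) 0 0 0 with ⟨b, m, d⟩
  have h := cgCountLoop_eq_alt (cgAltSuffix ("    <TIER LINGUISTIC_TYPE_REF=\"default-lt\" TIER_ID=\"" ++ type) lines) 0 0 0
  rw [hA] at h
  norm_num at h
  simp only [count_gestures, count_gestures_alt, hcopy, hA, cgEnc]
  rw [cgDelLoop_eq_suffix lines ("    <TIER LINGUISTIC_TYPE_REF=\"default-lt\" TIER_ID=\"" ++ type) lines 0 (by rfl)]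
  exact h
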